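-- pv_equiv track=rewrite | github.com/camall3n/actgen | actgen/wrappers/similarity_oracle.py | get_action_similarity_scores
-- ===== SOURCE A (Python) =====
-- def get_action_similarity_scores(a):
-- 	"""
-- 	return a list of similarity scores of 'a' with all the actions in the actions_space
-- 	"""
-- 	NOOP = [0, 2, 5, 6, 7, 8, 9]
-- 	FIRE = [1, 10, 11, 12, 13, 14, 15, 16, 17]
-- 	LEFT = [4]
-- 	RIGHT = [3]
-- 	action_type = None
-- 	# NO-OP action type
-- 	if a in NOOP:
-- 		action_type = NOOP
-- 	# FIRE action type:
-- 	elif a in FIRE: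
-- 		action_type = FIRE
-- 	# LEFT action type:
-- 	elif a in LEFT:
-- 		action_type = LEFT
-- 	# RIGHT action type:
-- 	elif a in RIGHT:
-- 		action_type = RIGHT
-- 	else:
-- 		raise RuntimeError('action {} not in action space of 18-action Breakout'.format(a))
--
-- 	similarity_score = [0] * 18
-- 	for a in action_type:
-- 		similarity_score[a] = 1
--
-- 	return similarity_score
-- ===== SOURCE B (Python) =====
-- def get_action_similarity_scores(a):
--     """
--     return a list of similarity scores of 'a' with all the actions in the actions_space
--     """
--     def kind(i):
--         # action-type of index i in 18-action Breakout, computed arithmetically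
--         if i == 3:
--             return 'RIGHT'
--         if i == 4:
--             return 'LEFT'
--         if i == 1 or 10 <= i <= 17:
--             return 'FIRE'
--         return 'NOOP'
--
--     if not (isinstance(a, int) and 0 <= a < 18):
--         raise RuntimeError('action {} not in action space of 18-action Breakout'.format(a))
--     k = kind(a)
--     return [1 if kind(i) == k else 0 for i in range(18)]
-- ===== Notes on version B (the rewrite author's own statement) =====
-- stated objective: simpler
-- what changed: Drops the group lists entirely: a small arithmetic kind() function classifies any index by value (RIGHT/LEFT/FIRE/NOOP), and the score vector is built by comparing kind(i) with kind(a) for each i in range(18), instead of selecting a group list by membership chain and writing 1s into it.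
import Mathlib
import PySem

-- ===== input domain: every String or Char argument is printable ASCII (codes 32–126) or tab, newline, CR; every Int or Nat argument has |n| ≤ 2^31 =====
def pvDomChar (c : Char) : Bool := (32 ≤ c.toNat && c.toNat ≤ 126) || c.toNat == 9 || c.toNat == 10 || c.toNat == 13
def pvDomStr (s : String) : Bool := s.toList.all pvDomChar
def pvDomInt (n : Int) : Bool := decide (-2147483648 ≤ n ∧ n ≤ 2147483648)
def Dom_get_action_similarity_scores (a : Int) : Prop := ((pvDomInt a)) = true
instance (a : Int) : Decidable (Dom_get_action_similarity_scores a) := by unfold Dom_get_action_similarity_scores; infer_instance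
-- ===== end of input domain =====

-- B replaces A's group lists and membership chain with an arithmetic per-index
-- classifier compared pairwise against the input's class (simpler).
-- ===== PORT A =====
-- literal transliteration of A: membership chain selects the group list,
-- then a fold writes 1 at each group index into a fresh [0]*18; else-branch raises (outside Pre_).
def get_action_similarity_scores (a : Int) : List Int :=
  let NOOP : List Int := [0, 2, 5, 6, 7, 8, 9]
  let FIRE : List Int := [1, 10, 11, 12, 13, 14, 15, 16, 17]
  let LEFT : List Int := [4]
  let RIGHT : List Int := [3]
  let action_type : Option (List Int) :=
    if a ∈ NOOP then some NOOP
    else if a ∈ FIRE then some FIRE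
    else if a ∈ LEFT then some LEFT
    else if a ∈ RIGHT then some RIGHT
    else none  -- Python: raise RuntimeError (outside Pre_)
  match action_type with
  | none => []
  | some at_ => at_.foldl (fun sc i => sc.set i.toNat 1) (List.replicate 18 (0 : Int))

-- ===== PORT B =====
-- Source B's kind(): classify an index arithmetically into its action type
def pvKind (i : Int) : String :=
  if i = 3 then "RIGHT"
  else if i = 4 then "LEFT"
  else if i = 1 ∨ (10 ≤ i ∧ i ≤ 17) then "FIRE"
  else "NOOP"

def get_action_similarity_scores_alt (a : Int) : List Int :=
  if ¬ (0 ≤ a ∧ a < 18) then []  -- Python: raise RuntimeError (outside Pre_)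
  else
    let k := pvKind a
    (PySem.List.pyRange 0 18 1).map (fun i => if pvKind i = k then (1 : Int) else 0)

-- ===== PRECONDITION & SPEC =====
-- Pre_ excludes exactly the inputs outside 0..17, on which A raises RuntimeError.
def Pre_get_action_similarity_scores (a : Int) : Prop := 0 ≤ a ∧ a < 18
instance (a : Int) : Decidable (Pre_get_action_similarity_scores a) := by unfold Pre_get_action_similarity_scores; infer_instance
def pvWitness_get_action_similarity_scores : Int := (5)
def Spec_get_action_similarity_scores (a : Int) (out : List Int) : Prop := out = get_action_similarity_scores_alt a
instance (a : Int) (out : List Int) : Decidable (Spec_get_action_similarity_scores a out) := by unfold Spec_get_action_similarity_scores; infer_instance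

-- ===== CLAIM (what is proved, stated in full; the proofs are below) =====
def Claim_equal_get_action_similarity_scores : Prop := ∀ (a : Int), Dom_get_action_similarity_scores a → Pre_get_action_similarity_scores a → Spec_get_action_similarity_scores a (get_action_similarity_scores a)

-- ===== LEMMAS AND PROOFS =====

-- ===== VERDICT (by name: the statement is the Claim_ definition above) =====
theorem get_action_similarity_scores_spec : Claim_equal_get_action_similarity_scores := by
  intro a _ h
  unfold Spec_get_action_similarity_scores
  obtain ⟨h0, h1⟩ := h
  interval_cases a <;> decide
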